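-- pv_equiv track=rewrite | github.com/RicardoChCz/StochasticTopologyRCC | Python/auxiliar.py | powersetEfective
-- ===== SOURCE A (Python) =====
-- def powerset(seq):
--     """
--     Returns all the possible subsets that can be made with the input set.
--     Input: Set
--     Output: list
--     """
--     seq = list(seq)
--
--     #Empty set or one element sets
--     if len(seq) <= 1:
--         yield seq
--         yield []
--
--     else:
--         for item in powerset(seq[1:]):
--             yield [seq[0]]+item
--             yield item
--
-- def powersetEfective(seq,kMin,kMax):
--     """
--     Returns all the possible subsets that can be made with the input set.
--     Input: Set
--     Output: list
--     """
--
--     seq = list(seq)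
--
--     #Empty set or one element sets
--     if len(seq) <= 1:
--         yield seq
--         yield []
--
--     else:
--         for item in powerset(seq[1:]):
--             if (len([seq[0]]+item) <= kMax and len([seq[0]]+item) >= kMin):
--                 yield [seq[0]]+item
--             if (len(item) <= kMax and len(item) >= kMin):
--                 yield item
-- ===== SOURCE B (Python) =====
-- def powersetEfective(seq, kMin, kMax):
--     """Yield only the subsets whose size lies in [kMin, kMax], recursing on the
--     last element and pruning every branch whose size window is empty, in the
--     same order as full enumeration (last element's inclusion varies slowest)."""
--     def gen(lst, lo, hi):
--         if hi < 0 or lo > len(lst):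
--             return
--         if not lst:
--             yield []
--             return
--         init, last = lst[:-1], lst[-1]
--         for s in gen(init, lo - 1, hi - 1):
--             yield s + [last]
--         yield from gen(init, lo, hi)
--     yield from gen(list(seq), kMin, kMax)
-- ===== Notes on version B (the rewrite author's own statement) =====
-- stated objective: alternative
-- what changed: B recurses on the LAST element carrying an explicit size window [lo,hi] and prunes every branch whose window is empty, so only size-valid subsets are ever built, instead of A's full recursive enumeration over the first element filtered subset-by-subset; on inputs of length <= 1 A's base case skips the size filter, stated as an intended difference.
-- intended difference: On empty input and on one-element input whose size window excludes some subset, A's base case yields seq and [] unfiltered (e.g. [[],[]] for seq=[]), while B yields only the subsets whose size lies in [kMin,kMax], which is the function's stated purpose. — e.g. on powersetEfective([], 0, 0): A returns [[], []], B returns [[]]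
import Mathlib
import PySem

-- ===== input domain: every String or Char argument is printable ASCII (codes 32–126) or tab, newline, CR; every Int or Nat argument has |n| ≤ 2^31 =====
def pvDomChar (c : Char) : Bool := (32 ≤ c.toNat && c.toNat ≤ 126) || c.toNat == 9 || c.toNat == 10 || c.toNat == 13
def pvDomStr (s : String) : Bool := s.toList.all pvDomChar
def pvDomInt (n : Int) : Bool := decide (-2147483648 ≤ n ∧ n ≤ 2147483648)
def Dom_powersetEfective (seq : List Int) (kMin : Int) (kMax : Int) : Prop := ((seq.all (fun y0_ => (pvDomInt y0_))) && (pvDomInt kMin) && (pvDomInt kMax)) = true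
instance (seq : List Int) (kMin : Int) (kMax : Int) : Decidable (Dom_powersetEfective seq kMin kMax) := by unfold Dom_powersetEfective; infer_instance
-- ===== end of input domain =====

-- B generates only size-valid subsets by recursing on the last element with a pruned size window
-- (instead of A's full enumeration filtered afterwards); A's unfiltered base case for inputs of
-- length ≤ 1 is stated as an intended difference (D_).


-- ===== PORT A =====
-- helper: A's generator `powerset` (full enumeration, recursing on the first element)
def pyPowerset (seq : List Int) : List (List Int) :=
  if seq.length ≤ 1 then [seq, []]
  else (pyPowerset (seq.drop 1)).flatMap (fun item => [seq.take 1 ++ item, item])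
termination_by seq.length
decreasing_by simp; omega

def powersetEfective (seq : List Int) (kMin : Int) (kMax : Int) : List (List Int) :=
  if seq.length ≤ 1 then [seq, []]
  else (pyPowerset (seq.drop 1)).flatMap (fun item =>
    (if ((seq.take 1 ++ item).length : Int) ≤ kMax ∧ kMin ≤ ((seq.take 1 ++ item).length : Int)
      then [seq.take 1 ++ item] else []) ++
    (if (item.length : Int) ≤ kMax ∧ kMin ≤ (item.length : Int) then [item] else []))

-- ===== PORT B =====
-- helper: B's `gen` (recursion on the last element with size window [lo,hi], pruned)
def altGen (lst : List Int) (lo hi : Int) : List (List Int) :=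
  if hi < 0 ∨ (lst.length : Int) < lo then []
  else if lst.isEmpty then [[]]
  else (altGen lst.dropLast (lo - 1) (hi - 1)).map (fun s => s ++ [lst.getLast!]) ++
       altGen lst.dropLast lo hi
termination_by lst.length
decreasing_by all_goals (cases lst <;> simp_all)

def powersetEfective_alt (seq : List Int) (kMin : Int) (kMax : Int) : List (List Int) :=
  altGen seq kMin kMax

-- ===== PRECONDITION & SPEC =====
-- On empty input and on one-element input whose size window excludes some subset, A's base case
-- yields seq and [] unfiltered (e.g. [[],[]] for seq=[]), while B yields only the subsets whose
-- size lies in [kMin,kMax], which is the function's stated purpose.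
def D_powersetEfective (seq : List Int) (kMin : Int) (kMax : Int) : Prop :=
  seq = [] ∨ (seq.length = 1 ∧ (0 < kMin ∨ kMax < 1))
instance (seq : List Int) (kMin : Int) (kMax : Int) : Decidable (D_powersetEfective seq kMin kMax) := by unfold D_powersetEfective; infer_instance

def Spec_powersetEfective (seq : List Int) (kMin : Int) (kMax : Int) (out : List (List Int)) : Prop := ¬ D_powersetEfective seq kMin kMax → out = powersetEfective_alt seq kMin kMax
instance (seq : List Int) (kMin : Int) (kMax : Int) (out : List (List Int)) : Decidable (Spec_powersetEfective seq kMin kMax out) := by unfold Spec_powersetEfective; infer_instance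

def pvDiffWitness_powersetEfective : List Int × Int × Int := ([], 0, 0)
def pvDiffWitnessOut_powersetEfective : (List (List Int)) × (List (List Int)) := ([[], []], [[]])

-- ===== CLAIM (what is proved, stated in full; the proofs are below) =====
def Claim_unchanged_powersetEfective : Prop := ∀ (seq : List Int) (kMin : Int) (kMax : Int), Dom_powersetEfective seq kMin kMax → Spec_powersetEfective seq kMin kMax (powersetEfective seq kMin kMax)
def Claim_changed_powersetEfective : Prop := Dom_powersetEfective (pvDiffWitness_powersetEfective.1) (pvDiffWitness_powersetEfective.2.1) (pvDiffWitness_powersetEfective.2.2) ∧ D_powersetEfective (pvDiffWitness_powersetEfective.1) (pvDiffWitness_powersetEfective.2.1) (pvDiffWitness_powersetEfective.2.2) ∧ powersetEfective (pvDiffWitness_powersetEfective.1) (pvDiffWitness_powersetEfective.2.1) (pvDiffWitness_powersetEfective.2.2) = pvDiffWitnessOut_powersetEfective.1 ∧ powersetEfective_alt (pvDiffWitness_powersetEfective.1) (pvDiffWitness_powersetEfective.2.1) (pvDiffWitness_powersetEfective.2.2) = pvDiffWitnessOut_powersetEfective.2 ∧ pvDiffWitnessOut_powersetEfective.1 ≠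 pvDiffWitnessOut_powersetEfective.2
def Claim_exact_powersetEfective : Prop := ∀ (seq : List Int) (kMin : Int) (kMax : Int), Dom_powersetEfective seq kMin kMax → D_powersetEfective seq kMin kMax → powersetEfective seq kMin kMax ≠ powersetEfective_alt seq kMin kMax

-- ===== LEMMAS AND PROOFS =====

-- the size-window predicate both results are characterised by
def szOK (lo hi : Int) (s : List Int) : Bool := decide (lo ≤ (s.length : Int)) && decide ((s.length : Int) ≤ hi)

theorem getLast!_concat_int (l : List Int) (a : Int) : (l ++ [a]).getLast! = a := by
  cases l with
  | nil => rfl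
  | cons x xs => simp [List.getLast!]

-- A's powerset of seq ++ [x] splits into (subsets of seq) ++ [x] followed by subsets of seq
theorem pyPowerset_concat (seq : List Int) (x : Int) (h : seq ≠ []) :
    pyPowerset (seq ++ [x]) = (pyPowerset seq).map (fun s => s ++ [x]) ++ pyPowerset seq := by
  induction seq with
  | nil => contradiction
  | cons a rest ih =>
    cases rest with
    | nil =>
      rw [pyPowerset]
      simp [pyPowerset]
    | cons b rs =>
      rw [show pyPowerset (a :: b :: rs ++ [x]) = (pyPowerset ((a :: b :: rs ++ [x]).drop 1)).flatMap (fun item => [(a :: b :: rs ++ [x]).take 1 ++ item, item]) by rw [pyPowerset]; simp]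
      rw [show ((a :: b :: rs ++ [x]).drop 1) = (b :: rs) ++ [x] by simp]
      rw [ih (by simp)]
      rw [show pyPowerset (a :: b :: rs) = (pyPowerset ((a :: b :: rs).drop 1)).flatMap (fun item => [(a :: b :: rs).take 1 ++ item, item]) by rw [pyPowerset]; simp]
      simp [List.flatMap_append, List.flatMap_map, List.map_flatMap]

-- every subset A enumerates is no longer than the input
theorem pyPowerset_length_le (seq : List Int) : ∀ s ∈ pyPowerset seq, s.length ≤ seq.length := by
  induction seq with
  | nil => intro s hs; rw [pyPowerset] at hs; simp at hs; simp [hs]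
  | cons a rest ih =>
    intro s hs
    rw [pyPowerset] at hs
    by_cases hr : rest = []
    · subst hr; simp at hs; rcases hs with h | h <;> simp [h]
    · have hlen : ¬ (a :: rest).length ≤ 1 := by cases rest <;> simp_all
      simp only [if_neg hlen, List.mem_flatMap] at hs
      obtain ⟨item, hitem, hmem⟩ := hs
      have := ih item (by simpa using hitem)
      simp at hmem
      rcases hmem with h | h <;> subst h <;> simp <;> omega

theorem altGen_nil (lo hi : Int) : altGen [] lo hi = if hi < 0 ∨ 0 < lo then [] else [[]] := by
  rw [altGen]; simp

-- B's pruned generator equals A's full enumeration filtered by the size window (nonempty input)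
theorem altGen_eq_filter (seq : List Int) : seq ≠ [] → ∀ lo hi : Int,
    altGen seq lo hi = (pyPowerset seq).filter (szOK lo hi) := by
  induction seq using List.reverseRecOn with
  | nil => intro h; contradiction
  | append_singleton init x ih =>
    intro _ lo hi
    by_cases hinit : init = []
    · subst hinit
      simp only [List.nil_append]
      rw [altGen, show [x].dropLast = [] from rfl, show [x].getLast! = x from rfl,
        altGen_nil, altGen_nil, show pyPowerset [x] = [[x], []] by rw [pyPowerset]; simp]
      simp only [List.filter_cons, List.filter_nil, szOK, List.length_cons, List.length_nil,
        Bool.and_eq_true, decide_eq_true_eq]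
      split_ifs <;> first | rfl | omega | simp_all
    · by_cases hp : hi < 0 ∨ (((init ++ [x]).length : Int)) < lo
      · rw [altGen, if_pos hp]
        symm; rw [List.filter_eq_nil_iff]
        intro s hs
        have hle := pyPowerset_length_le _ s hs
        simp only [szOK, Bool.and_eq_true, decide_eq_true_eq, not_and]
        simp at hle
        intro h1
        rcases hp with hp | hp
        · omega
        · simp at hp; omega
      · rw [altGen, if_neg hp]
        have : (init ++ [x]).isEmpty = false := by simp
        rw [this]
        simp only [Bool.false_eq_true, if_false, List.dropLast_concat, getLast!_concat_int]
        rw [ih hinit, ih hinit, pyPowerset_concat init x hinit]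
        rw [List.filter_append, List.filter_map]
        have hpred : (szOK lo hi ∘ fun s => s ++ [x]) = szOK (lo-1) (hi-1) := by
          funext s
          simp only [Function.comp, szOK, List.length_append, List.length_cons, List.length_nil]
          congr 1 <;> rw [decide_eq_decide] <;> push_cast <;> omega
        rw [hpred]

-- A's function on inputs of length ≥ 2 is exactly the filtered full enumeration
theorem powersetEfective_eq_filter (seq : List Int) (kMin kMax : Int) (h : 2 ≤ seq.length) :
    powersetEfective seq kMin kMax = (pyPowerset seq).filter (szOK kMin kMax) := by
  obtain ⟨a, rest, rfl⟩ : ∃ a rest, seq = a :: rest := by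
    cases seq with
    | nil => simp at h
    | cons a rest => exact ⟨a, rest, rfl⟩
  have hlen : ¬ (a :: rest).length ≤ 1 := by simp only [List.length_cons] at h ⊢; omega
  rw [powersetEfective, if_neg hlen]
  conv_rhs => rw [pyPowerset, if_neg hlen]
  rw [List.filter_flatMap]
  congr 1
  funext item
  simp only [show List.take 1 (a :: rest) = [a] from rfl, List.cons_append, List.nil_append,
    List.length_cons, List.filter_cons, List.filter_nil, szOK, Bool.and_eq_true,
    decide_eq_true_eq]
  split_ifs <;> (try simp) <;> omega

-- ===== VERDICT (by name: the statement is the Claim_ definition above) =====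
theorem powersetEfective_spec : Claim_unchanged_powersetEfective := by
  intro seq kMin kMax _ hD
  cases seq with
  | nil => exact absurd (Or.inl rfl) hD
  | cons a rest =>
    cases rest with
    | nil =>
      have hk : kMin ≤ 0 ∧ 1 ≤ kMax := by
        simp [D_powersetEfective] at hD; omega
      rw [powersetEfective_alt, altGen, show [a].dropLast = [] from rfl,
        show [a].getLast! = a from rfl, altGen_nil, altGen_nil]
      rw [powersetEfective, if_pos (by simp)]
      split_ifs <;> simp_all <;> omega
    | cons b rs =>
      rw [powersetEfective_eq_filter _ _ _ (by simp), powersetEfective_alt,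
        altGen_eq_filter _ (by simp)]

theorem powersetEfective_changed : Claim_changed_powersetEfective := by
  unfold Claim_changed_powersetEfective
  refine ⟨by decide, by decide, by decide, ?_, by decide⟩
  show powersetEfective_alt [] 0 0 = [[]]
  rw [powersetEfective_alt, altGen]; decide

theorem powersetEfective_tight : Claim_exact_powersetEfective := by
  intro seq kMin kMax _ hD heq
  rcases hD with h | ⟨hlen, hk⟩
  · subst h
    rw [show powersetEfective [] kMin kMax = [[], []] by rw [powersetEfective]; simp] at heq
    rw [powersetEfective_alt, altGen_nil] at heq
    split_ifs at heq <;> simp at heq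
  · obtain ⟨a, rfl⟩ : ∃ a, seq = [a] := by
      cases seq with
      | nil => simp at hlen
      | cons a rest => cases rest with
        | nil => exact ⟨a, rfl⟩
        | cons b rs => simp at hlen
    rw [show powersetEfective [a] kMin kMax = [[a], []] by rw [powersetEfective]; simp] at heq
    rw [powersetEfective_alt, altGen, show [a].dropLast = [] from rfl,
      show [a].getLast! = a from rfl, altGen_nil, altGen_nil] at heq
    split_ifs at heq <;> simp_all <;> omega
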